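-- pv_equiv track=rewrite | github.com/nipunramk/Video-Dev | JPEGImageCompression/functions.py | zigzag
-- ===== SOURCE A (Python) =====
-- def zigzag(n):
--     """zigzag rows"""
--
--     def compare(xy):
--         x, y = xy
--         return (x + y, -y if (x + y) % 2 else y)
--
--     xs = range(n)
--     return {
--         n: index
--         for n, index in enumerate(sorted(((x, y) for x in xs for y in xs), key=compare))
--     }
-- ===== SOURCE B (Python) =====
-- def zigzag(n):
--     """zigzag rows"""
--     coords = []
--     for s in range(2 * n - 1):
--         lo = max(0, s - n + 1)
--         hi = min(s, n - 1)
--         if s % 2: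
--             coords.extend(zip(range(s - hi, s - lo + 1), range(hi, lo - 1, -1)))
--         else:
--             coords.extend(zip(range(s - lo, s - hi - 1, -1), range(lo, hi + 1)))
--     return dict(enumerate(coords))
-- ===== Notes on version B (the rewrite author's own statement) =====
-- stated objective: faster
-- what changed: B generates the coordinates directly diagonal-by-diagonal (zipping the x- and y-ranges of each diagonal, reversed on odd diagonals) instead of sorting all n^2 grid cells by a zigzag key.
import Mathlib
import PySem

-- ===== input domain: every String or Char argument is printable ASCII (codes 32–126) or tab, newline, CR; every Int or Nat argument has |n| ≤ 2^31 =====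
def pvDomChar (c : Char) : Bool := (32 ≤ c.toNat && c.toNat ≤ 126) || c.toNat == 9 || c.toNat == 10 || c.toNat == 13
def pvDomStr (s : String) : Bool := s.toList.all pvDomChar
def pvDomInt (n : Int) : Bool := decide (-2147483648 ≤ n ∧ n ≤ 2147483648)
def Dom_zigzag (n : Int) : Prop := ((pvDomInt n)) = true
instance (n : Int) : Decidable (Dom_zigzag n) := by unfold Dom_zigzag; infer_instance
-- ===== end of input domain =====

-- B replaces A's sort of all n^2 cells under a zigzag key by a direct
-- diagonal-by-diagonal generation with alternating direction (objective: faster).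

-- ===== PORT A =====
-- A: enumerate(sorted((x,y) for x in range(n) for y in range(n), key=compare)) as a dict {i: (x,y)}
def zigzag (n : Int) : List (Int × Int × Int) :=
  let xs := PySem.List.pyRange 0 n 1
  let pairs := xs.flatMap (fun x => xs.map (fun y => (x, y)))
  PySem.List.enumerate
    (PySem.List.sorted2 pairs (fun p => p.1 + p.2)
      (fun p => if PySem.Int.mod (p.1 + p.2) 2 ≠ 0 then -p.2 else p.2))

-- ===== PORT B =====
-- B: for each diagonal s, zip the x-range with the y-range of the diagonal, reversed on odd s
def zigzag_alt (n : Int) : List (Int × Int × Int) :=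
  let coords := (PySem.List.pyRange 0 (2 * n - 1) 1).flatMap (fun s =>
    let lo := max 0 (s - n + 1)
    let hi := min s (n - 1)
    if PySem.Int.mod s 2 ≠ 0 then
      (PySem.List.pyRange (s - hi) (s - lo + 1) 1).zip (PySem.List.pyRange hi (lo - 1) (-1))
    else
      (PySem.List.pyRange (s - lo) (s - hi - 1) (-1)).zip (PySem.List.pyRange lo (hi + 1) 1))
  PySem.List.enumerate coords

-- ===== PRECONDITION & SPEC =====
def Spec_zigzag (n : Int) (out : List (Int × Int × Int)) : Prop := out = zigzag_alt n
instance (n : Int) (out : List (Int × Int × Int)) : Decidable (Spec_zigzag n out) := by unfold Spec_zigzag; infer_instance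

-- ===== CLAIM (what is proved, stated in full; the proofs are below) =====
def Claim_equal_zigzag : Prop := ∀ (n : Int), Dom_zigzag n → Spec_zigzag n (zigzag n)

-- ===== LEMMAS AND PROOFS =====

-- proof-side names, definitionally equal to the lists inside the two ports
def pvPairs (n : Int) : List (Int × Int) :=
  (PySem.List.pyRange 0 n 1).flatMap (fun x => (PySem.List.pyRange 0 n 1).map (fun y => (x, y)))

def pvBlock (n s : Int) : List (Int × Int) :=
  if PySem.Int.mod s 2 ≠ 0 then
    (PySem.List.pyRange (min s (n - 1)) (max 0 (s - n + 1) - 1) (-1)).map (fun y => (s - y, y))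
  else
    (PySem.List.pyRange (max 0 (s - n + 1)) (min s (n - 1) + 1) 1).map (fun y => (s - y, y))

def pvCoords (n : Int) : List (Int × Int) :=
  (PySem.List.pyRange 0 (2 * n - 1) 1).flatMap (pvBlock n)

def pvKey (p : Int × Int) : Lex (Int × Int) :=
  toLex (p.1 + p.2, if PySem.Int.mod (p.1 + p.2) 2 ≠ 0 then -p.2 else p.2)

-- sorted2 is sorted under the lexicographic key
lemma sorted2_eq_sorted_toLex {α : Type} (xs : List α) (k1 k2 : α → Int) :
    PySem.List.sorted2 xs k1 k2 false
      = PySem.List.sorted xs (fun a => toLex (k1 a, k2 a)) false := by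
  simp only [PySem.List.sorted2, PySem.List.sorted]
  congr 1
  funext acc x
  congr 1
  funext a b
  simp only [Prod.Lex.toLex_lt_toLex]
  by_cases h1 : k1 a < k1 b <;> by_cases h2 : k1 b < k1 a <;> by_cases h3 : k2 a < k2 b <;>
    simp [h1, h2, h3] <;> omega

-- pairwise through flatMap: within each block and between blocks
lemma pairwise_flatMap_of {α β : Type} (R : α → α → Prop) (S : β → β → Prop)
    (f : β → List α) (l : List β)
    (hl : l.Pairwise S)
    (hin : ∀ b ∈ l, (f b).Pairwise R)
    (hbet : ∀ b1 b2, S b1 b2 → ∀ a1 ∈ f b1, ∀ a2 ∈ f b2, R a1 a2) :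
    (l.flatMap f).Pairwise R := by
  induction l with
  | nil => simp
  | cons b t ih =>
    simp only [List.flatMap_cons]
    rw [List.pairwise_append]
    refine ⟨hin b (by simp), ih hl.tail (fun c hc => hin c (by simp [hc])), ?_⟩
    intro a1 ha1 a2 ha2
    rcases List.mem_flatMap.1 ha2 with ⟨c, hc, hac⟩
    exact hbet b c (List.rel_of_pairwise_cons hl hc) a1 ha1 a2 hac

-- the zipped ranges of B are the mapped y-ranges of pvBlock
lemma zip_odd (s lo hi : Int) :
    (PySem.List.pyRange (s - hi) (s - lo + 1) 1).zip (PySem.List.pyRange hi (lo - 1) (-1))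
      = (PySem.List.pyRange hi (lo - 1) (-1)).map (fun y => (s - y, y)) := by
  rw [PySem.List.pyRange_one, PySem.List.pyRange_neg_one,
    show (s - lo + 1 - (s - hi)) = (hi - (lo - 1)) from by ring,
    List.zip_map', List.map_map]
  congr 1
  funext k
  simp only [Function.comp_apply, Prod.mk.injEq]
  exact ⟨by ring, trivial⟩

lemma zip_even (s lo hi : Int) :
    (PySem.List.pyRange (s - lo) (s - hi - 1) (-1)).zip (PySem.List.pyRange lo (hi + 1) 1)
      = (PySem.List.pyRange lo (hi + 1) 1).map (fun y => (s - y, y)) := by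
  rw [PySem.List.pyRange_neg_one, PySem.List.pyRange_one,
    show (s - lo - (s - hi - 1)) = (hi + 1 - lo) from by ring,
    List.zip_map', List.map_map]
  congr 1
  funext k
  simp only [Function.comp_apply, Prod.mk.injEq]
  exact ⟨by ring, trivial⟩

lemma altBlock_eq (n s : Int) :
    (if PySem.Int.mod s 2 ≠ 0 then
      (PySem.List.pyRange (s - min s (n - 1)) (s - max 0 (s - n + 1) + 1) 1).zip
        (PySem.List.pyRange (min s (n - 1)) (max 0 (s - n + 1) - 1) (-1))
    else
      (PySem.List.pyRange (s - max 0 (s - n + 1)) (s - min s (n - 1) - 1) (-1)).zip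
        (PySem.List.pyRange (max 0 (s - n + 1)) (min s (n - 1) + 1) 1))
      = pvBlock n s := by
  unfold pvBlock
  split_ifs with h
  · exact zip_odd s _ _
  · exact zip_even s _ _

lemma pvKey_mk (s y : Int) :
    pvKey (s - y, y) = toLex (s, if PySem.Int.mod s 2 ≠ 0 then -y else y) := by
  unfold pvKey
  dsimp only
  rw [show s - y + y = s from by ring]

lemma mem_pvBlock (n s : Int) (p : Int × Int) :
    p ∈ pvBlock n s ↔ ∃ y, max 0 (s - n + 1) ≤ y ∧ y ≤ min s (n - 1) ∧ p = (s - y, y) := by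
  unfold pvBlock
  split_ifs with h <;>
    simp only [List.mem_map, PySem.List.mem_pyRange_neg_one, PySem.List.mem_pyRange_one]
  · constructor
    · rintro ⟨y, hy, rfl⟩; exact ⟨y, by omega, by omega, rfl⟩
    · rintro ⟨y, h1, h2, rfl⟩; exact ⟨y, by omega, rfl⟩
  · constructor
    · rintro ⟨y, hy, rfl⟩; exact ⟨y, by omega, by omega, rfl⟩
    · rintro ⟨y, h1, h2, rfl⟩; exact ⟨y, by omega, rfl⟩

lemma pvBlock_sum (n s : Int) (p : Int × Int) (hp : p ∈ pvBlock n s) : p.1 + p.2 = s := by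
  rcases (mem_pvBlock n s p).1 hp with ⟨y, _, _, rfl⟩; simp

lemma mem_pvCoords (n : Int) (p : Int × Int) :
    p ∈ pvCoords n ↔ 0 ≤ p.1 ∧ p.1 < n ∧ 0 ≤ p.2 ∧ p.2 < n := by
  unfold pvCoords
  simp only [List.mem_flatMap, PySem.List.mem_pyRange_one, mem_pvBlock]
  constructor
  · rintro ⟨s, hs, y, hy1, hy2, rfl⟩
    refine ⟨?_, ?_, ?_, ?_⟩ <;> dsimp only <;> omega
  · rintro ⟨h1, h2, h3, h4⟩
    refine ⟨p.1 + p.2, by omega, p.2, by omega, by omega, ?_⟩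
    obtain ⟨a, b⟩ := p
    rw [Prod.mk.injEq]
    exact ⟨by dsimp only at *; omega, rfl⟩

lemma mem_pvPairs (n : Int) (p : Int × Int) :
    p ∈ pvPairs n ↔ 0 ≤ p.1 ∧ p.1 < n ∧ 0 ≤ p.2 ∧ p.2 < n := by
  unfold pvPairs
  simp only [List.mem_flatMap, List.mem_map, PySem.List.mem_pyRange_one]
  constructor
  · rintro ⟨x, hx, y, hy, rfl⟩
    exact ⟨hx.1, hx.2, hy.1, hy.2⟩
  · rintro ⟨h1, h2, h3, h4⟩
    exact ⟨p.1, ⟨h1, h2⟩, p.2, ⟨h3, h4⟩, rfl⟩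

lemma nodup_pvPairs (n : Int) : (pvPairs n).Nodup := by
  unfold pvPairs
  apply pairwise_flatMap_of (S := (· < ·))
  · exact PySem.List.pairwise_lt_pyRange_one 0 n
  · intro x _
    rw [List.pairwise_map]
    exact (PySem.List.pairwise_lt_pyRange_one 0 n).imp
      (fun hab hq => by rw [Prod.mk.injEq] at hq; omega)
  · intro x1 x2 hx a1 ha1 a2 ha2
    rcases List.mem_map.1 ha1 with ⟨y1, _, rfl⟩
    rcases List.mem_map.1 ha2 with ⟨y2, _, rfl⟩
    intro hq
    rw [Prod.mk.injEq] at hq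
    omega

lemma pairwise_key_pvCoords (n : Int) :
    (pvCoords n).Pairwise (fun a b => pvKey a < pvKey b) := by
  unfold pvCoords
  apply pairwise_flatMap_of (S := (· < ·))
  · exact PySem.List.pairwise_lt_pyRange_one 0 (2 * n - 1)
  · intro s _
    unfold pvBlock
    split_ifs with h
    · rw [PySem.List.pyRange_neg_one_eq_reverse, List.map_reverse, List.pairwise_reverse,
        List.pairwise_map]
      refine (PySem.List.pairwise_lt_pyRange_one _ _).imp ?_
      intro a b hab
      rw [pvKey_mk, pvKey_mk, if_pos h, if_pos h, Prod.Lex.toLex_lt_toLex]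
      right; exact ⟨rfl, by omega⟩
    · rw [List.pairwise_map]
      refine (PySem.List.pairwise_lt_pyRange_one _ _).imp ?_
      intro a b hab
      rw [pvKey_mk, pvKey_mk, if_neg h, if_neg h, Prod.Lex.toLex_lt_toLex]
      right; exact ⟨rfl, hab⟩
  · intro s1 s2 hs a1 ha1 a2 ha2
    have h1 := pvBlock_sum n s1 a1 ha1
    have h2 := pvBlock_sum n s2 a2 ha2
    unfold pvKey
    rw [Prod.Lex.toLex_lt_toLex]
    left; omega

lemma nodup_pvCoords (n : Int) : (pvCoords n).Nodup := by
  refine (pairwise_key_pvCoords n).imp ?_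
  intro a b h he
  exact absurd (he ▸ h) (lt_irrefl _)

lemma perm_pvCoords_pvPairs (n : Int) : (pvCoords n).Perm (pvPairs n) := by
  rw [List.perm_ext_iff_of_nodup (nodup_pvCoords n) (nodup_pvPairs n)]
  intro p
  rw [mem_pvCoords, mem_pvPairs]

lemma sorted_key_eq_pvCoords (n : Int) :
    PySem.List.sorted2 (pvPairs n) (fun p => p.1 + p.2)
      (fun p => if PySem.Int.mod (p.1 + p.2) 2 ≠ 0 then -p.2 else p.2) false = pvCoords n := by
  rw [sorted2_eq_sorted_toLex]
  exact PySem.List.sorted_eq_of_perm_of_pairwise_lt _ _ pvKey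
    (perm_pvCoords_pvPairs n) (pairwise_key_pvCoords n)

-- ===== VERDICT (by name: the statement is the Claim_ definition above) =====
theorem zigzag_spec : Claim_equal_zigzag := by
  intro n _
  show zigzag n = zigzag_alt n
  have hA : zigzag n = PySem.List.enumerate
      (PySem.List.sorted2 (pvPairs n) (fun p => p.1 + p.2)
        (fun p => if PySem.Int.mod (p.1 + p.2) 2 ≠ 0 then -p.2 else p.2) false) := rfl
  have hB : zigzag_alt n = PySem.List.enumerate (pvCoords n) := by
    unfold zigzag_alt pvCoords
    dsimp only
    congr 1
    congr 1
    funext s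
    dsimp only
    exact altBlock_eq n s
  rw [hA, hB, sorted_key_eq_pvCoords n]
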